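-- pv_equiv track=rewrite | github.com/Rustam-Z/cracking-maang | array_string/string/isomorphic_strings.py | make_numeric
-- ===== SOURCE A (Python) =====
-- def make_numeric(string):
--     arr = list(string)
--     str_map = {}
--     counter = 1
--
--     for i in range(len(arr)):
--         if arr[i] not in str_map:
--             str_map[arr[i]] = counter
--             counter += 1
--         arr[i] = str(str_map[arr[i]])
--
--     return ''.join(arr)
-- ===== SOURCE B (Python) =====
-- def make_numeric(string):
--     # A char's number is the count of distinct characters in the prefix of the
--     # string ending at that char's first occurrence; compute it once per distinct char.
--     value = {c: str(len(set(string[:string.index(c) + 1]))) for c in dict.fromkeys(string)}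
--     return ''.join(value[c] for c in string)
-- ===== Notes on version B (the rewrite author's own statement) =====
-- stated objective: alternative
-- what changed: Replaces A's single stateful pass that grows a char->counter dict while rewriting the array by a stateless closed form: each distinct character's number is computed independently as the count of distinct characters in the string prefix ending at its first occurrence (index + slice + set), with no running counter or incremental mapping.
import Mathlib
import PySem

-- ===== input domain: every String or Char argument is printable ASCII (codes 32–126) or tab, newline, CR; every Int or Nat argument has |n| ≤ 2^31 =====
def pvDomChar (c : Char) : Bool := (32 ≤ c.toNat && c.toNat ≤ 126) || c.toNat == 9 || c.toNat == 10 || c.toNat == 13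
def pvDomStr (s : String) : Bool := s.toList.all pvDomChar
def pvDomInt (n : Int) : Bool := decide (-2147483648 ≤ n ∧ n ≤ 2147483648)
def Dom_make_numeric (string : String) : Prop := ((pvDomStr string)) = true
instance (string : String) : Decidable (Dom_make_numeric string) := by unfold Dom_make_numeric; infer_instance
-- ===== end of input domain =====

-- B replaces A's stateful dict+counter pass by a stateless per-character closed form
-- (distinct-character count of the prefix ending at the char's first occurrence) — objective: alternative.

-- ===== PORT A =====
-- the for-loop of A: state = (str_map, counter); emits str(str_map[arr[i]]) per char
def pvGoA : List Char → PySem.Dict Char Int → Int → List String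
  | [], _, _ => []
  | c :: rest, m, counter =>
    if m.contains c then
      PySem.Int.toStr (m.getD c 0) :: pvGoA rest m counter
    else
      let m' := m.insert c counter
      PySem.Int.toStr (m'.getD c 0) :: pvGoA rest m' (counter + 1)

def make_numeric (string : String) : String :=
  PySem.Str.join "" (pvGoA string.toList PySem.Dict.empty 1)

-- ===== PORT B =====
-- str(len(set(string[:string.index(c) + 1]))): the dict comprehension's value expression;
-- string.index(c) → PySem.List.index? (none = ValueError, unreachable since c is drawn from string)
def pvValB (s : List Char) (c : Char) : String :=
  match PySem.List.index? s c with
  | some i =>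
      PySem.Int.toStr
        ((PySem.Set.ofList (PySem.List.slice s none (some ((i : Int) + 1)))).length : Int)
  | none => ""

-- value = {c: … for c in dict.fromkeys(string)}; return ''.join(value[c] for c in string)
def make_numeric_alt (string : String) : String :=
  let val : PySem.Dict Char String :=
    (PySem.List.dedup string.toList).foldl (fun d c => d.insert c (pvValB string.toList c)) PySem.Dict.empty
  PySem.Str.join "" (string.toList.map (fun c => val.getD c ""))

-- ===== PRECONDITION & SPEC =====
def Spec_make_numeric (string : String) (out : String) : Prop := out = make_numeric_alt string
instance (string : String) (out : String) : Decidable (Spec_make_numeric string out) := by unfold Spec_make_numeric; infer_instance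

-- ===== CLAIM (what is proved, stated in full; the proofs are below) =====
def Claim_equal_make_numeric : Prop := ∀ (string : String), Dom_make_numeric string → Spec_make_numeric string (make_numeric string)

-- ===== LEMMAS AND PROOFS =====

theorem pv_idxOf_update (cs : List Char) : ∀ (d : List Char) (x : Char), x ∈ d →
    List.idxOf x (PySem.Set.update d cs) = List.idxOf x d := by
  induction cs with
  | nil => intro d x hx; simp [PySem.Set.update]
  | cons c cs ih =>
    intro d x hx
    have hstep : PySem.Set.update d (c :: cs) = PySem.Set.update (PySem.Set.add d c) cs := by
      simp [PySem.Set.update, List.foldl]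
    rw [hstep]
    by_cases hc : c ∈ d
    · have : PySem.Set.add d c = d := by
        simp [PySem.Set.add, PySem.Set.contains_eq_listContains, hc]
      rw [this]; exact ih d x hx
    · have hadd : PySem.Set.add d c = d ++ [c] := by
        simp [PySem.Set.add, PySem.Set.contains_eq_listContains, hc]
      rw [hadd, ih (d ++ [c]) x (by simp [hx]), List.idxOf_append_of_mem hx]

-- A's loop computes, per char, str(1 + first-appearance rank)
theorem pv_goA_spec (cs : List Char) : ∀ (d : List Char) (m : PySem.Dict Char Int),
    (∀ x, m.get? x = if x ∈ d then some (1 + (List.idxOf x d : Int)) else none) →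
    pvGoA cs m (1 + d.length) =
      cs.map (fun c => PySem.Int.toStr (1 + (List.idxOf c (PySem.Set.update d cs) : Int))) := by
  induction cs with
  | nil => intro d m _; simp [pvGoA]
  | cons c cs ih =>
    intro d m hm
    have hstep : PySem.Set.update d (c :: cs) = PySem.Set.update (PySem.Set.add d c) cs := by
      simp [PySem.Set.update, List.foldl]
    have hcont : m.contains c = decide (c ∈ d) := by
      rw [PySem.Dict.contains_eq_isSome_get?, hm c]
      by_cases hc : c ∈ d <;> simp [hc]
    by_cases hc : c ∈ d
    · have hadd : PySem.Set.add d c = d := by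
        simp [PySem.Set.add, PySem.Set.contains_eq_listContains, hc]
      have hgd : m.getD c 0 = 1 + (List.idxOf c d : Int) := by
        rw [PySem.Dict.getD_eq_get?_getD, hm c]; simp [hc]
      simp only [pvGoA, hcont, hc, decide_true, if_true, hgd, List.map_cons, hstep, hadd,
        ih d m hm]
      congr 2
      rw [pv_idxOf_update cs d c hc]
    · have hadd : PySem.Set.add d c = d ++ [c] := by
        simp [PySem.Set.add, PySem.Set.contains_eq_listContains, hc]
      have hm' : ∀ x, (m.insert c (1 + (d.length : Int))).get? x =
          if x ∈ d ++ [c] then some (1 + (List.idxOf x (d ++ [c]) : Int)) else none := by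
        intro x
        rw [PySem.Dict.get?_insert]
        by_cases hxc : x = c
        · subst hxc
          simp [List.idxOf_append_of_notMem hc]
        · rw [if_neg hxc, hm x]
          by_cases hxd : x ∈ d
          · simp [hxd, hxc, List.idxOf_append_of_mem hxd]
          · simp [hxd, hxc]
      have hlen : (1 : Int) + d.length + 1 = 1 + (d ++ [c]).length := by
        simp; omega
      have hgd : (m.insert c (1 + (d.length : Int))).getD c 0 = 1 + (d.length : Int) := by
        rw [PySem.Dict.getD_eq_get?_getD, hm' c]
        simp [List.idxOf_append_of_notMem hc]
      simp only [pvGoA, hcont, hc, decide_false, Bool.false_eq_true, if_false]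
      rw [hgd, hlen, ih (d ++ [c]) _ hm', hstep, hadd, List.map_cons]
      congr 2
      rw [pv_idxOf_update cs (d ++ [c]) c (by simp), List.idxOf_append_of_notMem hc]
      simp

-- the prefix ending at c's first occurrence is (chars before it, none of them c) ++ [c]
theorem pv_take_idxOf (s : List Char) (c : Char) (hc : c ∈ s) :
    s.take (List.idxOf c s + 1) = s.take (List.idxOf c s) ++ [c] ∧ c ∉ s.take (List.idxOf c s) := by
  induction s with
  | nil => cases hc
  | cons a t ih =>
    by_cases hac : a = c
    · subst hac; simp [List.idxOf_cons_self]
    · have hct : c ∈ t := by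
        rcases List.mem_cons.mp hc with h | h
        · exact absurd h.symm hac
        · exact h
      have hidx : List.idxOf c (a :: t) = List.idxOf c t + 1 :=
        List.idxOf_cons_ne _ (by simpa using hac)
      obtain ⟨h1, h2⟩ := ih hct
      refine ⟨?_, ?_⟩
      · rw [hidx]; simp [List.take_succ_cons, h1]
      · rw [hidx]; simp [List.take_succ_cons]
        exact ⟨fun h => hac h.symm, h2⟩

theorem pv_ofList_append_singleton (u : List Char) (c : Char) (hc : c ∉ u) :
    PySem.Set.ofList (u ++ [c]) = PySem.Set.ofList u ++ [c] := by
  rw [PySem.Set.ofList_eq_foldl, List.foldl_append]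
  simp only [List.foldl_cons, List.foldl_nil]
  rw [← PySem.Set.ofList_eq_foldl]
  have : c ∉ PySem.Set.ofList u := by simpa [PySem.Set.mem_ofList] using hc
  simp [PySem.Set.add, PySem.Set.contains_eq_listContains, this]

theorem pv_prefix_update (v : List Char) : ∀ (d : List Char), ∃ t, PySem.Set.update d v = d ++ t := by
  induction v with
  | nil => intro d; exact ⟨[], by simp [PySem.Set.update]⟩
  | cons x v ih =>
    intro d
    have hstep : PySem.Set.update d (x :: v) = PySem.Set.update (PySem.Set.add d x) v := by
      simp [PySem.Set.update, List.foldl]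
    by_cases hx : x ∈ d
    · have : PySem.Set.add d x = d := by
        simp [PySem.Set.add, PySem.Set.contains_eq_listContains, hx]
      rw [hstep, this]; exact ih d
    · have hadd : PySem.Set.add d x = d ++ [x] := by
        simp [PySem.Set.add, PySem.Set.contains_eq_listContains, hx]
      obtain ⟨t, ht⟩ := ih (d ++ [x])
      exact ⟨x :: t, by rw [hstep, hadd, ht]; simp⟩

-- the key count: distinct chars in prefix up to first occurrence of c = rank of c in dedup + 1
theorem pv_rank (s : List Char) (c : Char) (hc : c ∈ s) :
    (PySem.Set.ofList (s.take (List.idxOf c s + 1))).length = List.idxOf c (PySem.Set.ofList s) + 1 := by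
  obtain ⟨h1, h2⟩ := pv_take_idxOf s c hc
  have hof : PySem.Set.ofList (s.take (List.idxOf c s + 1)) =
      PySem.Set.ofList (s.take (List.idxOf c s)) ++ [c] := by
    rw [h1, pv_ofList_append_singleton _ _ h2]
  have hsplit : s = s.take (List.idxOf c s + 1) ++ s.drop (List.idxOf c s + 1) :=
    (List.take_append_drop _ _).symm
  have hupd : PySem.Set.ofList s =
      PySem.Set.update (PySem.Set.ofList (s.take (List.idxOf c s + 1))) (s.drop (List.idxOf c s + 1)) := by
    conv_lhs => rw [hsplit]
    rw [PySem.Set.ofList_eq_foldl, List.foldl_append, ← PySem.Set.ofList_eq_foldl]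
    rfl
  obtain ⟨t, ht⟩ := pv_prefix_update (s.drop (List.idxOf c s + 1)) (PySem.Set.ofList (s.take (List.idxOf c s + 1)))
  have hcp : c ∉ PySem.Set.ofList (s.take (List.idxOf c s)) := by
    simpa [PySem.Set.mem_ofList] using h2
  have hidx : List.idxOf c (PySem.Set.ofList s) = (PySem.Set.ofList (s.take (List.idxOf c s))).length := by
    rw [hupd, ht, hof]
    rw [List.append_assoc, List.singleton_append, List.idxOf_append_of_notMem hcp]
    simp [List.idxOf_cons_self]
  rw [hof, hidx]
  simp

-- the memo dict built over the distinct chars looks up to the value expression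
theorem pv_lookup_fold (f : Char → String) (ks : List Char) : ∀ (dd : PySem.Dict Char String) (c : Char),
    (ks.foldl (fun d k => d.insert k (f k)) dd).get? c = if c ∈ ks then some (f c) else dd.get? c := by
  induction ks with
  | nil => intro dd c; simp
  | cons k t ih =>
    intro dd c
    simp only [List.foldl_cons]
    rw [ih]
    by_cases hct : c ∈ t
    · simp [hct]
    · rw [PySem.Dict.get?_insert]
      by_cases hck : c = k
      · subst hck; simp [hct]
      · simp [hct, hck]

theorem pv_idxOf?_of_mem (l : List Char) (c : Char) (h : c ∈ l) :
    List.idxOf? c l = some (List.idxOf c l) := by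
  induction l with
  | nil => cases h
  | cons a t ih =>
    by_cases hac : a = c
    · subst hac; simp [List.idxOf?_cons, List.idxOf_cons_self]
    · have hct : c ∈ t := by
        rcases List.mem_cons.mp h with h' | h'
        · exact absurd h'.symm hac
        · exact h'
      rw [List.idxOf?_cons, List.idxOf_cons_ne _ (by simpa using hac)]
      simp [hac, ih hct]

-- ===== VERDICT (by name: the statement is the Claim_ definition above) =====
theorem make_numeric_spec : Claim_equal_make_numeric := by
  intro s _
  unfold Spec_make_numeric make_numeric make_numeric_alt
  have hA : pvGoA s.toList PySem.Dict.empty 1 =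
      s.toList.map (fun c => PySem.Int.toStr (1 + (List.idxOf c (PySem.Set.update [] s.toList) : Int))) := by
    have := pv_goA_spec s.toList [] PySem.Dict.empty (by intro x; simp)
    simpa using this
  have hupd0 : PySem.Set.update [] s.toList = PySem.Set.ofList s.toList := by
    rw [PySem.Set.ofList_eq_foldl]; rfl
  rw [hA, hupd0]
  congr 1
  apply List.map_congr_left
  intro c hc
  have hcd : c ∈ PySem.List.dedup s.toList := by
    rw [PySem.List.mem_dedup]; exact hc
  rw [PySem.Dict.getD_eq_get?_getD, pv_lookup_fold (pvValB s.toList) (PySem.List.dedup s.toList) PySem.Dict.empty c,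
    if_pos hcd]
  simp only [Option.getD_some]
  have hidx? : PySem.List.index? s.toList c = some (List.idxOf c s.toList) := by
    rw [PySem.List.index?_eq_idxOf?]
    exact pv_idxOf?_of_mem _ _ hc
  unfold pvValB
  rw [hidx?]
  simp only []
  have hslice : PySem.List.slice s.toList none (some ((List.idxOf c s.toList : Int) + 1)) =
      s.toList.take (List.idxOf c s.toList + 1) := by
    have : ((List.idxOf c s.toList : Int) + 1) = ((List.idxOf c s.toList + 1 : Nat) : Int) := by push_cast; ring
    rw [this, PySem.List.slice_to_natCast]
  rw [hslice, pv_rank s.toList c hc]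
  congr 1
  push_cast
  ring
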